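-- pv_equiv track=rewrite | github.com/fanjc320/pythonFactory | testSplitPolygon1.py | split_polygon
-- ===== SOURCE A (Python) =====
-- def split_polygon(polygon, split_lines):
--     """使用分割线分割多边形"""
--     sub_polygons = [polygon]
--
--     for line in split_lines:
--         new_polygons = []
--         for poly in sub_polygons:
--             # 简化的分割 - 实际需要实现多边形分割算法
--             # 这里将多边形分成两部分作为示例
--             if len(poly) > 4:
--                 mid = len(poly) // 2
--                 new_polygons.append(poly[:mid])
--                 new_polygons.append(poly[mid:])
--             else:
--                 new_polygons.append(poly)
--         sub_polygons = new_polygons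
--
--     return sub_polygons
-- ===== SOURCE B (Python) =====
-- def split_polygon(polygon, split_lines):
--     """Divide-and-conquer over the halving tree instead of sweeping round by round."""
--     def rec(poly, rounds):
--         if rounds == 0 or len(poly) <= 4:
--             return [poly]
--         mid = len(poly) // 2
--         return rec(poly[:mid], rounds - 1) + rec(poly[mid:], rounds - 1)
--     return rec(polygon, len(split_lines))
-- ===== Notes on version B (the rewrite author's own statement) =====
-- stated objective: faster
-- what changed: Replaces the round-by-round sweep (which re-copies every current polygon each round) with a divide-and-conquer recursion on the halving tree that short-circuits as soon as a piece has length <= 4, so each piece is touched once instead of once per remaining round.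
import Mathlib
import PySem

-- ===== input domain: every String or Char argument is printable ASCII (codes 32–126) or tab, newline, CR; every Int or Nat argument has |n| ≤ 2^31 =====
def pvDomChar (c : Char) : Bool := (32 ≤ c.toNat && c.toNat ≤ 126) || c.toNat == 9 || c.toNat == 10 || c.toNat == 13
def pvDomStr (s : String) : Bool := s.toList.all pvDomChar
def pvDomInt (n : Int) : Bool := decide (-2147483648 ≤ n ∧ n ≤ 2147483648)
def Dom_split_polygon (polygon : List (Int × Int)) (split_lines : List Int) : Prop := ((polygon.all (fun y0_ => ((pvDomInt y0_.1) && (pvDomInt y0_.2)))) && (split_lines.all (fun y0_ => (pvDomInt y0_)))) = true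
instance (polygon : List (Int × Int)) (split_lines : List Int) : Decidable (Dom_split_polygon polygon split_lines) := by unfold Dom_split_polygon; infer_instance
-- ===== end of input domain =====

-- B replaces A's round-by-round sweep with a divide-and-conquer recursion on the halving tree (simpler decomposition, same values).


-- ===== PORT A =====
-- poly[:mid] / poly[mid:] with 0 ≤ mid ≤ len are exactly List.take / List.drop.
def split_polygon (polygon : List (Int × Int)) (split_lines : List Int) : List (List (Int × Int)) :=
  split_lines.foldl
    (fun sub_polygons _line =>
      sub_polygons.foldl
        (fun new_polygons poly =>
          if poly.length > 4 then
            let mid := poly.length / 2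
            (new_polygons ++ [poly.take mid]) ++ [poly.drop mid]
          else
            new_polygons ++ [poly])
        [])
    [polygon]

-- ===== PORT B =====
def recSplit (poly : List (Int × Int)) : Nat → List (List (Int × Int))
  | 0 => [poly]
  | rounds + 1 =>
    if poly.length ≤ 4 then [poly]
    else
      recSplit (poly.take (poly.length / 2)) rounds ++ recSplit (poly.drop (poly.length / 2)) rounds

def split_polygon_alt (polygon : List (Int × Int)) (split_lines : List Int) : List (List (Int × Int)) :=
  recSplit polygon split_lines.length

-- ===== PRECONDITION & SPEC =====
def Spec_split_polygon (polygon : List (Int × Int)) (split_lines : List Int) (out : List (List (Int × Int))) : Prop := out = split_polygon_alt polygon split_lines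
instance (polygon : List (Int × Int)) (split_lines : List Int) (out : List (List (Int × Int))) : Decidable (Spec_split_polygon polygon split_lines out) := by unfold Spec_split_polygon; infer_instance

-- ===== CLAIM (what is proved, stated in full; the proofs are below) =====
def Claim_equal_split_polygon : Prop := ∀ (polygon : List (Int × Int)) (split_lines : List Int), Dom_split_polygon polygon split_lines → Spec_split_polygon polygon split_lines (split_polygon polygon split_lines)

-- ===== LEMMAS AND PROOFS =====

-- one polygon's split in a single round
def step1 (p : List (Int × Int)) : List (List (Int × Int)) :=
  if p.length > 4 then [p.take (p.length / 2), p.drop (p.length / 2)] else [p]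

-- n rounds of splitting every polygon of the list
def iterN : Nat → List (List (Int × Int)) → List (List (Int × Int))
  | 0, L => L
  | n + 1, L => iterN n (L.flatMap step1)

theorem inner_foldl (subs acc : List (List (Int × Int))) :
    subs.foldl
      (fun new_polygons poly =>
        if poly.length > 4 then
          let mid := poly.length / 2
          (new_polygons ++ [poly.take mid]) ++ [poly.drop mid]
        else
          new_polygons ++ [poly]) acc = acc ++ subs.flatMap step1 := by
  induction subs generalizing acc with
  | nil => simp
  | cons p t ih =>
    simp only [List.foldl_cons, List.flatMap_cons, ih, step1]
    split_ifs <;> simp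

theorem outer_foldl (lines : List Int) (L : List (List (Int × Int))) :
    lines.foldl
      (fun sub_polygons _line =>
        sub_polygons.foldl
          (fun new_polygons poly =>
            if poly.length > 4 then
              let mid := poly.length / 2
              (new_polygons ++ [poly.take mid]) ++ [poly.drop mid]
            else
              new_polygons ++ [poly]) [])
      L = iterN lines.length L := by
  induction lines generalizing L with
  | nil => rfl
  | cons _ t ih =>
    rw [List.foldl_cons, inner_foldl, List.nil_append, ih]
    rfl

theorem iterN_append (n : Nat) (L₁ L₂ : List (List (Int × Int))) :
    iterN n (L₁ ++ L₂) = iterN n L₁ ++ iterN n L₂ := by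
  induction n generalizing L₁ L₂ with
  | zero => rfl
  | succ n ih => simp only [iterN, List.flatMap_append, ih]

theorem iterN_small (n : Nat) (p : List (Int × Int)) (h : p.length ≤ 4) :
    iterN n [p] = [p] := by
  induction n with
  | zero => rfl
  | succ n ih =>
    simp only [iterN, List.flatMap_cons, List.flatMap_nil, List.append_nil, step1]
    rw [if_neg (by omega)]
    exact ih

theorem iterN_eq_recSplit (n : Nat) (p : List (Int × Int)) :
    iterN n [p] = recSplit p n := by
  induction n generalizing p with
  | zero => rfl
  | succ n ih =>
    by_cases h : p.length ≤ 4
    · rw [recSplit, if_pos h, iterN_small _ _ h]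
    · rw [recSplit, if_neg h]
      simp only [iterN, List.flatMap_cons, List.flatMap_nil, List.append_nil, step1]
      rw [if_pos (by omega)]
      rw [show [p.take (p.length / 2), p.drop (p.length / 2)] =
        [p.take (p.length / 2)] ++ [p.drop (p.length / 2)] from rfl, iterN_append, ih, ih]

-- ===== VERDICT (by name: the statement is the Claim_ definition above) =====
theorem split_polygon_spec : Claim_equal_split_polygon := by
  intro polygon split_lines _
  show split_polygon polygon split_lines = split_polygon_alt polygon split_lines
  rw [split_polygon, outer_foldl, split_polygon_alt, iterN_eq_recSplit]
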